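-- pv_equiv track=rewrite | github.com/thebenkogan/everybody-codes-2025 | 14.py | step
-- ===== SOURCE A (Python) =====
-- DIRS = [(1, 1), (1, -1), (-1, 1), (-1, -1)]
--
-- def step(grid):
--     new_grid = [["."] * len(grid[0]) for _ in range(len(grid))]
--     for y, row in enumerate(grid):
--         for x, c in enumerate(row):
--             active_diag = 0
--             for dx, dy in DIRS:
--                 nx, ny = x + dx, y + dy
--                 if (
--                     0 <= nx < len(grid[0])
--                     and 0 <= ny < len(grid)
--                     and grid[ny][nx] == "#"
--                 ):
--                     active_diag += 1
--
--             if c == "#" and active_diag % 2 == 1: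
--                 new_grid[y][x] = "#"
--             if c == "." and active_diag % 2 == 0:
--                 new_grid[y][x] = "#"
--
--     return new_grid
-- ===== SOURCE B (Python) =====
-- def step(grid):
--     H, W = len(grid), len(grid[0])
--     zeros = [0] * W
--
--     def diag(row):
--         # contribution of `row` to each cell of an adjacent row: left+right shifted indicators
--         r = [1 if c == "#" else 0 for c in row]
--         return [(r[x - 1] if x > 0 else 0) + (r[x + 1] if x + 1 < W else 0)
--                 for x in range(W)]
--
--     out = []
--     for y in range(H):
--         above = diag(grid[y - 1]) if y > 0 else zeros
--         below = diag(grid[y + 1]) if y + 1 < H else zeros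
--         out.append([
--             "#" if ((c == "#" and (a + b) % 2 == 1) or (c == "." and (a + b) % 2 == 0))
--             else "."
--             for c, a, b in zip(grid[y], above, below)
--         ])
--     return out
-- ===== Notes on version B (the rewrite author's own statement) =====
-- stated objective: faster
-- what changed: B replaces A's per-cell gather over the DIRS offset list (with per-neighbour bounds checks and a mutated output grid) by a row-window decomposition: each row's 0/1 indicator is shifted left and right to form its diagonal contribution to the adjacent rows, and each output row is built in one zip over the row and the two precomputed contribution rows, with no index arithmetic into the grid and no mutation. Constant-factor speedup: each row's shifted indicator is computed once and reused by the whole adjacent row, instead of four bounds-checked lookups per cell.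
-- outside the precondition, e.g. on step([['.'], []]): A returns [['#'], ['.']], B returns [['#'], []]; on step([['.', '.'], ['.']]): A raises IndexError, B raises IndexError; on step([]): A returns [], B raises IndexError
import Mathlib
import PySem

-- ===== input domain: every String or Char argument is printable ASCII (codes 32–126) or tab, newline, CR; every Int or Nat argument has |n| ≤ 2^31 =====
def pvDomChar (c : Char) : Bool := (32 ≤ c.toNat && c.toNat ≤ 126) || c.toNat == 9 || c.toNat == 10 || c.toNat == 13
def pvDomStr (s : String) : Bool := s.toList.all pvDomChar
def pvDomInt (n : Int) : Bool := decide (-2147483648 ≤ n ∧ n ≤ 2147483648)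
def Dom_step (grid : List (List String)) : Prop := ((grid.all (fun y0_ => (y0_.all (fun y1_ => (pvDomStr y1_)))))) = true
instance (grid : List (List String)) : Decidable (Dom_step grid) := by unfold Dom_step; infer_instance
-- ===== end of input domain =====

-- B replaces A's per-cell gather over DIRS by a row-window pass: indicator rows shifted
-- left/right give each row's diagonal contribution to its neighbours; same return value,
-- no mutation of the input in either version.

-- ===== PORT A =====
def DIRS : List (Int × Int) := [(1, 1), (1, -1), (-1, 1), (-1, -1)]

-- A's inner `for dx, dy in DIRS` loop (pure: reads only `grid`), named as a helper
def activeDiag (grid : List (List String)) (W : Nat) (x y : Int) : Int :=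
  DIRS.foldl (fun a d =>
    let nx := x + d.1
    let ny := y + d.2
    -- grid[ny][nx] guarded by the bounds checks: pyGetD is exact there (rows have length W under Pre_)
    if 0 ≤ nx ∧ nx < (W : Int) ∧ 0 ≤ ny ∧ ny < (grid.length : Int) ∧
        PySem.List.pyGetD (PySem.List.pyGetD grid ny []) nx "" = "#" then a + 1 else a) 0

-- new_grid[y][x] = "#"
def writeCell (ng : List (List String)) (y x : Int) : List (List String) :=
  PySem.List.pySetD ng y (PySem.List.pySetD (PySem.List.pyGetD ng y []) x "#")

def step (grid : List (List String)) : List (List String) :=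
  let W := (PySem.List.pyGetD grid 0 []).length     -- len(grid[0]); [] default: Pre_ excludes the empty grid
  let ng0 := List.replicate grid.length (List.replicate W ".")
  (PySem.List.enumerate grid).foldl (fun ng yrow =>
    (PySem.List.enumerate yrow.2).foldl (fun ng xc =>
      let a := activeDiag grid W xc.1 yrow.1
      let ng1 := if xc.2 = "#" ∧ PySem.Int.mod a 2 = 1 then writeCell ng yrow.1 xc.1 else ng
      if xc.2 = "." ∧ PySem.Int.mod a 2 = 0 then writeCell ng1 yrow.1 xc.1 else ng1) ng) ng0

-- ===== PORT B =====
-- [1 if c == "#" else 0 for c in row]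
def indRow (row : List String) : List Int := row.map (fun c => if c = "#" then 1 else 0)

-- diag(row): left+right shifted indicators (r[x-1] / r[x+1] are in range under Pre_: rows have length W)
def diagRow (W : Nat) (row : List String) : List Int :=
  let r := indRow row
  (List.range W).map (fun x =>
    (if 0 < x then r.getD (x - 1) 0 else 0) + (if x + 1 < W then r.getD (x + 1) 0 else 0))

def step_alt (grid : List (List String)) : List (List String) :=
  let H := grid.length
  let W := (PySem.List.pyGetD grid 0 []).length
  let zeros := List.replicate W (0 : Int)
  (List.range H).map (fun y =>
    let above := if 0 < y then diagRow W (grid.getD (y - 1) []) else zeros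
    let below := if y + 1 < H then diagRow W (grid.getD (y + 1) []) else zeros
    ((grid.getD y []).zip (above.zip below)).map (fun cab =>
      if (cab.1 = "#" ∧ PySem.Int.mod (cab.2.1 + cab.2.2) 2 = 1) ∨
         (cab.1 = "." ∧ PySem.Int.mod (cab.2.1 + cab.2.2) 2 = 0) then "#" else "."))

-- ===== PRECONDITION & SPEC =====
-- Pre_ excludes the empty grid, on which B naturally raises while A accidentally returns []
-- (its comprehension never evaluates len(grid[0])), and ragged grids, on which A's bounds checks
-- against the first row's width raise IndexError on most shapes and pad/truncate the rest accidentally.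
def Pre_step (grid : List (List String)) : Prop :=
  grid ≠ [] ∧ ∀ row ∈ grid, row.length = (grid.headD []).length
instance (grid : List (List String)) : Decidable (Pre_step grid) := by unfold Pre_step; infer_instance

def pvWitness_step : List (List String) := [["#", "."], [".", "#"]]

def Spec_step (grid : List (List String)) (out : List (List String)) : Prop := out = step_alt grid
instance (grid : List (List String)) (out : List (List String)) : Decidable (Spec_step grid out) := by unfold Spec_step; infer_instance

-- ===== CLAIM (what is proved, stated in full; the proofs are below) =====
def Claim_equal_step : Prop := ∀ (grid : List (List String)), Dom_step grid → Pre_step grid → Spec_step grid (step grid)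

-- ===== LEMMAS AND PROOFS =====

-- one in-bounds-and-active test of A's inner loop
def hitP (grid : List (List String)) (W : Nat) (y x : Int) : Int :=
  if 0 ≤ x ∧ x < (W : Int) ∧ 0 ≤ y ∧ y < (grid.length : Int) ∧
      PySem.List.pyGetD (PySem.List.pyGetD grid y []) x "" = "#" then 1 else 0

theorem activeDiag_eq (grid : List (List String)) (W : Nat) (x y : Int) :
    activeDiag grid W x y =
      hitP grid W (y + 1) (x + 1) + hitP grid W (y - 1) (x + 1) +
      hitP grid W (y + 1) (x - 1) + hitP grid W (y - 1) (x - 1) := by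
  simp only [activeDiag, DIRS, List.foldl, hitP,
    show ∀ z : Int, z + -1 = z - 1 from fun _ => by ring]
  split_ifs <;> omega

-- the value A leaves at cell (y, x) holding c
def cellv (grid : List (List String)) (W : Nat) (y x : Int) (c : String) : String :=
  if (c = "#" ∧ PySem.Int.mod (activeDiag grid W x y) 2 = 1) ∨
     (c = "." ∧ PySem.Int.mod (activeDiag grid W x y) 2 = 0) then "#" else "."

-- row-level mirror of A's inner loop
def rowRes (grid : List (List String)) (W : Nat) (y : Int) (ry : List String) (s : Nat) :
    List String → List String
  | [] => ry
  | c :: xs => rowRes grid W y (if cellv grid W y (s : Int) c = "#" then ry.set s "#" else ry) (s + 1) xs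

-- the canonical result grid
def target (grid : List (List String)) : List (List String) :=
  (List.range grid.length).map (fun (y : Nat) =>
    (List.range (PySem.List.pyGetD grid 0 []).length).map (fun (x : Nat) =>
      cellv grid (PySem.List.pyGetD grid 0 []).length (y : Int) (x : Int)
        ((grid.getD y []).getD x "")))

theorem inner_cell (grid : List (List String)) (W : Nat) (done rest : List (List String))
    (ry : List String) (s : Nat) (c : String) :
    (let a := activeDiag grid W (s : Int) (done.length : Int)
     let ng1 := if c = "#" ∧ PySem.Int.mod a 2 = 1 then
        writeCell (done ++ ry :: rest) (done.length : Int) (s : Int) else done ++ ry :: rest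
     if c = "." ∧ PySem.Int.mod a 2 = 0 then
        writeCell ng1 (done.length : Int) (s : Int) else ng1)
    = done ++ (if cellv grid W (done.length : Int) (s : Int) c = "#" then ry.set s "#" else ry) :: rest := by
  simp only [writeCell, PySem.List.pySetD_natCast, PySem.List.pyGetD_natCast]
  by_cases h1 : c = "#" ∧ PySem.Int.mod (activeDiag grid W (s : Int) (done.length : Int)) 2 = 1
  · by_cases h2 : c = "." ∧ PySem.Int.mod (activeDiag grid W (s : Int) (done.length : Int)) 2 = 0
    · obtain ⟨e1, _⟩ := h1; obtain ⟨e2, _⟩ := h2; subst e1; exact absurd e2 (by decide)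
    · rw [if_pos h1, if_neg h2]
      have hc : cellv grid W (done.length : Int) (s : Int) c = "#" := by
        rw [cellv, if_pos (Or.inl h1)]
      rw [hc]; simp
  · by_cases h2 : c = "." ∧ PySem.Int.mod (activeDiag grid W (s : Int) (done.length : Int)) 2 = 0
    · rw [if_neg h1, if_pos h2]
      have hc : cellv grid W (done.length : Int) (s : Int) c = "#" := by
        rw [cellv, if_pos (Or.inr h2)]
      rw [hc]; simp
    · rw [if_neg h1, if_neg h2]
      have hc : cellv grid W (done.length : Int) (s : Int) c = "." := by
        rw [cellv, if_neg (by rintro (h | h) <;> [exact h1 h; exact h2 h])]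
      rw [hc]; simp

theorem inner_loop (grid : List (List String)) (W : Nat) (xs : List String) :
    ∀ (s : Nat) (done rest : List (List String)) (ry : List String),
    (PySem.List.enumerate xs (s : Int)).foldl (fun ng xc =>
      let a := activeDiag grid W xc.1 (done.length : Int)
      let ng1 := if xc.2 = "#" ∧ PySem.Int.mod a 2 = 1 then writeCell ng (done.length : Int) xc.1 else ng
      if xc.2 = "." ∧ PySem.Int.mod a 2 = 0 then writeCell ng1 (done.length : Int) xc.1 else ng1)
      (done ++ ry :: rest)
    = done ++ rowRes grid W (done.length : Int) ry s xs :: rest := by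
  induction xs with
  | nil => intro s done rest ry; simp [PySem.List.enumerate_nil, rowRes]
  | cons c xs ih =>
    intro s done rest ry
    rw [PySem.List.enumerate_cons]
    simp only [List.foldl_cons]
    rw [inner_cell grid W done rest ry s c]
    have : ((s : Int) + 1) = ((s + 1 : Nat) : Int) := by push_cast; ring
    rw [this, ih (s + 1) done rest _]
    rfl

theorem row_res_map (grid : List (List String)) (W : Nat) (y : Int) (xs : List String) :
    ∀ (s : Nat) (r0 : List String), r0.length = s →
    rowRes grid W y (r0 ++ List.replicate xs.length ".") s xs
      = r0 ++ (PySem.List.enumerate xs (s : Int)).map (fun xc => cellv grid W y xc.1 xc.2) := by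
  induction xs with
  | nil => intro s r0 _; simp [rowRes, PySem.List.enumerate_nil]
  | cons c xs ih =>
    intro s r0 hr
    simp only [List.length_cons, List.replicate_succ, rowRes]
    have hset : ∀ v : String, (r0 ++ "." :: List.replicate xs.length ".").set s v
        = r0 ++ v :: List.replicate xs.length "." := by
      intro v; rw [← hr]; simp
    have hstep : (if cellv grid W y (s : Int) c = "#"
          then (r0 ++ "." :: List.replicate xs.length ".").set s "#"
          else r0 ++ "." :: List.replicate xs.length ".")
        = (r0 ++ [cellv grid W y (s : Int) c]) ++ List.replicate xs.length "." := by
      by_cases h : cellv grid W y (s : Int) c = "#"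
      · rw [if_pos h, hset, h]; simp
      · have : cellv grid W y (s : Int) c = "." := by
          unfold cellv at h ⊢; split_ifs at h ⊢ <;> simp_all
        rw [if_neg h, this]; simp
    rw [hstep, ih (s + 1) (r0 ++ [cellv grid W y (s : Int) c]) (by simp [hr])]
    rw [PySem.List.enumerate_cons]
    have : ((s : Int) + 1) = ((s + 1 : Nat) : Int) := by push_cast; ring
    rw [this]
    simp

theorem outer_loop (grid : List (List String)) (W : Nat) (rows : List (List String)) :
    ∀ (s : Nat) (done : List (List String)), done.length = s →
    (PySem.List.enumerate rows (s : Int)).foldl (fun ng yrow =>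
      (PySem.List.enumerate yrow.2).foldl (fun ng xc =>
        let a := activeDiag grid W xc.1 yrow.1
        let ng1 := if xc.2 = "#" ∧ PySem.Int.mod a 2 = 1 then writeCell ng yrow.1 xc.1 else ng
        if xc.2 = "." ∧ PySem.Int.mod a 2 = 0 then writeCell ng1 yrow.1 xc.1 else ng1) ng)
      (done ++ List.replicate rows.length (List.replicate W "."))
    = done ++ (PySem.List.enumerate rows (s : Int)).map
        (fun yr => rowRes grid W yr.1 (List.replicate W ".") 0 yr.2) := by
  induction rows with
  | nil => intro s done _; simp [PySem.List.enumerate_nil]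
  | cons row rows ih =>
    intro s done hd
    rw [PySem.List.enumerate_cons]
    simp only [List.foldl_cons, List.length_cons, List.replicate_succ]
    have h0 : (0 : Int) = ((0 : Nat) : Int) := rfl
    have he : (PySem.List.enumerate row (0 : Int)).foldl (fun ng xc =>
        let a := activeDiag grid W xc.1 (s : Int)
        let ng1 := if xc.2 = "#" ∧ PySem.Int.mod a 2 = 1 then writeCell ng (s : Int) xc.1 else ng
        if xc.2 = "." ∧ PySem.Int.mod a 2 = 0 then writeCell ng1 (s : Int) xc.1 else ng1)
        (done ++ List.replicate W "." :: List.replicate rows.length (List.replicate W "."))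
      = done ++ rowRes grid W (s : Int) (List.replicate W ".") 0 row
          :: List.replicate rows.length (List.replicate W ".") := by
      rw [h0, ← hd]
      exact inner_loop grid W row 0 done _ _
    rw [he]
    have : ((s : Int) + 1) = ((s + 1 : Nat) : Int) := by push_cast; ring
    rw [this, show done ++ rowRes grid W (s : Int) (List.replicate W ".") 0 row
          :: List.replicate rows.length (List.replicate W ".")
        = (done ++ [rowRes grid W (s : Int) (List.replicate W ".") 0 row])
          ++ List.replicate rows.length (List.replicate W ".") by simp]
    rw [ih (s + 1) _ (by simp [hd])]
    simp

-- ---- B side ----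

theorem indRow_getD (row : List String) (k : Nat) (hk : k < row.length) :
    (indRow row).getD k 0 = if row[k] = "#" then 1 else 0 := by
  rw [List.getD_eq_getElem _ _ (by simpa [indRow] using hk)]
  simp [indRow]

theorem diag_getElem (grid : List (List String))
    (hrect : ∀ row ∈ grid, row.length = (grid.headD []).length)
    (W : Nat) (hW : W = (PySem.List.pyGetD grid 0 []).length)
    (j x : Nat) (hj : j < grid.length) (hx : x < W) :
    (diagRow W (grid.getD j []))[x]'(by simp [diagRow, hx])
      = hitP grid W (j : Int) ((x : Int) - 1) + hitP grid W (j : Int) ((x : Int) + 1) := by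
  have hrowlen : (grid.getD j []).length = W := by
    rw [List.getD_eq_getElem _ _ hj, hW]
    have := hrect grid[j] (List.getElem_mem hj)
    rw [this]
    cases grid with
    | nil => simp at hj
    | cons r rs => simp [PySem.List.pyGetD_zero]
  simp only [diagRow, List.getElem_map, List.getElem_range]
  have hleft : hitP grid W (j : Int) ((x : Int) - 1)
      = if 0 < x then (indRow (grid.getD j [])).getD (x - 1) 0 else 0 := by
    by_cases hx0 : 0 < x
    · rw [if_pos hx0, hitP]
      rw [show ((x : Int) - 1) = (((x - 1 : Nat)) : Int) by omega]
      simp only [PySem.List.pyGetD_natCast]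
      rw [if_congr (show _ ↔ (grid.getD j []).getD (x-1) "" = "#" by
            constructor
            · rintro ⟨_, _, _, _, h⟩; exact h
            · intro h; refine ⟨by omega, by omega, by omega, by omega, h⟩) rfl rfl]
      rw [indRow_getD _ _ (by omega), List.getD_eq_getElem _ _ (by omega)]
    · rw [if_neg hx0, hitP, if_neg (by rintro ⟨h, _⟩; omega)]
  have hright : hitP grid W (j : Int) ((x : Int) + 1)
      = if x + 1 < W then (indRow (grid.getD j [])).getD (x + 1) 0 else 0 := by
    by_cases hx1 : x + 1 < W
    · rw [if_pos hx1, hitP]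
      rw [show ((x : Int) + 1) = (((x + 1 : Nat)) : Int) by omega]
      simp only [PySem.List.pyGetD_natCast]
      rw [if_congr (show _ ↔ (grid.getD j []).getD (x+1) "" = "#" by
            constructor
            · rintro ⟨_, _, _, _, h⟩; exact h
            · intro h; refine ⟨by omega, by omega, by omega, by omega, h⟩) rfl rfl]
      rw [indRow_getD _ _ (by omega), List.getD_eq_getElem _ _ (by omega)]
    · rw [if_neg hx1, hitP, if_neg (by rintro ⟨_, h, _⟩; omega)]
  rw [hleft, hright]

theorem above_getElem (grid : List (List String))
    (hrect : ∀ row ∈ grid, row.length = (grid.headD []).length)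
    (W : Nat) (hW : W = (PySem.List.pyGetD grid 0 []).length)
    (y x : Nat) (hy : y < grid.length) (hx : x < W) :
    (if 0 < y then diagRow W (grid.getD (y - 1) []) else List.replicate W (0 : Int))[x]'
        (by split <;> simp [diagRow, hx])
      = hitP grid W ((y : Int) - 1) ((x : Int) - 1) + hitP grid W ((y : Int) - 1) ((x : Int) + 1) := by
  by_cases hy0 : 0 < y
  · rw [show ((y : Int) - 1) = (((y - 1 : Nat)) : Int) by omega]
    simp only [if_pos hy0]
    exact diag_getElem grid hrect W hW (y - 1) x (by omega) hx
  · simp only [if_neg hy0, List.getElem_replicate]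
    rw [hitP, if_neg (by rintro ⟨_, _, h, _⟩; omega),
        hitP, if_neg (by rintro ⟨_, _, h, _⟩; omega)]
    norm_num

theorem below_getElem (grid : List (List String))
    (hrect : ∀ row ∈ grid, row.length = (grid.headD []).length)
    (W : Nat) (hW : W = (PySem.List.pyGetD grid 0 []).length)
    (y x : Nat) (hy : y < grid.length) (hx : x < W) :
    (if y + 1 < grid.length then diagRow W (grid.getD (y + 1) []) else List.replicate W (0 : Int))[x]'
        (by split <;> simp [diagRow, hx])
      = hitP grid W ((y : Int) + 1) ((x : Int) - 1) + hitP grid W ((y : Int) + 1) ((x : Int) + 1) := by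
  by_cases hy1 : y + 1 < grid.length
  · rw [show ((y : Int) + 1) = (((y + 1 : Nat)) : Int) by omega]
    simp only [if_pos hy1]
    exact diag_getElem grid hrect W hW (y + 1) x (by omega) hx
  · simp only [if_neg hy1, List.getElem_replicate]
    rw [hitP, if_neg (by rintro ⟨_, _, _, h, _⟩; omega),
        hitP, if_neg (by rintro ⟨_, _, _, h, _⟩; omega)]
    norm_num

theorem alt_eq_target (grid : List (List String)) (hpre : Pre_step grid) :
    step_alt grid = target grid := by
  obtain ⟨hne, hrect⟩ := hpre
  have halt : step_alt grid = (List.range grid.length).map (fun (y : Nat) =>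
      ((grid.getD y []).zip
        ((if 0 < y then diagRow (PySem.List.pyGetD grid 0 []).length (grid.getD (y - 1) [])
            else List.replicate (PySem.List.pyGetD grid 0 []).length (0 : Int)).zip
         (if y + 1 < grid.length then diagRow (PySem.List.pyGetD grid 0 []).length (grid.getD (y + 1) [])
            else List.replicate (PySem.List.pyGetD grid 0 []).length (0 : Int)))).map
        (fun cab =>
          if (cab.1 = "#" ∧ PySem.Int.mod (cab.2.1 + cab.2.2) 2 = 1) ∨
             (cab.1 = "." ∧ PySem.Int.mod (cab.2.1 + cab.2.2) 2 = 0) then "#" else ".")) := rfl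
  rw [halt, target]
  apply List.ext_getElem
  · simp
  · intro y hy1 hy2
    have hylen : y < grid.length := by simpa using hy1
    have hrow : (grid.getD y []).length = (PySem.List.pyGetD grid 0 []).length := by
      rw [List.getD_eq_getElem _ _ hylen]
      have := hrect grid[y] (List.getElem_mem hylen)
      rw [this]
      cases grid with
      | nil => simp at hylen
      | cons r rs => simp [PySem.List.pyGetD_zero]
    simp only [List.getElem_map, List.getElem_range]
    apply List.ext_getElem
    · simp only [List.length_map, List.length_zip, List.length_range]
      split_ifs <;>
        simp only [diagRow, List.length_map, List.length_range, List.length_replicate] <;>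
        omega
    · intro x hx1 hx2
      have hxW : x < (PySem.List.pyGetD grid 0 []).length := by simpa using hx2
      simp only [List.getElem_map, List.getElem_zip, List.getElem_range]
      have hsum : (if 0 < y then diagRow (PySem.List.pyGetD grid 0 []).length (grid.getD (y - 1) [])
              else List.replicate (PySem.List.pyGetD grid 0 []).length (0 : Int))[x]'
              (by split <;> simp [diagRow, hxW])
            + (if y + 1 < grid.length then diagRow (PySem.List.pyGetD grid 0 []).length (grid.getD (y + 1) [])
              else List.replicate (PySem.List.pyGetD grid 0 []).length (0 : Int))[x]'
              (by split <;> simp [diagRow, hxW])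
          = activeDiag grid (PySem.List.pyGetD grid 0 []).length (x : Int) (y : Int) := by
        rw [above_getElem grid hrect _ rfl y x hylen hxW,
            below_getElem grid hrect _ rfl y x hylen hxW,
            activeDiag_eq]
        ring
      have e2 : (grid.getD y []).getD x "" = (grid.getD y [])[x]'(by omega) :=
        List.getD_eq_getElem _ _ (by omega)
      simp only [cellv, ← hsum, e2]

theorem step_eq_target (grid : List (List String)) (hpre : Pre_step grid) :
    step grid = target grid := by
  obtain ⟨hne, hrect⟩ := hpre
  have h0 := outer_loop grid (PySem.List.pyGetD grid 0 []).length grid 0 [] rfl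
  simp only [List.nil_append, Nat.cast_zero] at h0
  have hstep : step grid = (PySem.List.enumerate grid 0).map
      (fun yr => rowRes grid (PySem.List.pyGetD grid 0 []).length yr.1
        (List.replicate (PySem.List.pyGetD grid 0 []).length ".") 0 yr.2) := h0
  rw [hstep, target]
  apply List.ext_getElem
  · simp [PySem.List.length_enumerate]
  · intro y hy1 hy2
    have hylen : y < grid.length := by simpa [PySem.List.length_enumerate] using hy1
    have hrow : grid[y].length = (PySem.List.pyGetD grid 0 []).length := by
      have := hrect grid[y] (List.getElem_mem hylen)
      rw [this]
      cases grid with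
      | nil => simp at hylen
      | cons r rs => simp [PySem.List.pyGetD_zero]
    simp only [List.getElem_map, PySem.List.getElem_enumerate, List.getElem_range]
    have hrepl : List.replicate (PySem.List.pyGetD grid 0 []).length ("." : String)
        = List.replicate grid[y].length "." := by rw [hrow]
    have hr := row_res_map grid (PySem.List.pyGetD grid 0 []).length ((0 : Int) + (y : Nat))
      grid[y] 0 [] rfl
    simp only [List.nil_append, Nat.cast_zero] at hr
    simp only [hrepl, hr]
    apply List.ext_getElem
    · simp [PySem.List.length_enumerate, hrow]
    · intro x hx1 hx2
      have hxlen : x < grid[y].length := by simpa [PySem.List.length_enumerate] using hx1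
      simp only [List.getElem_map, PySem.List.getElem_enumerate, List.getElem_range]
      have e1 : grid.getD y [] = grid[y] := List.getD_eq_getElem _ _ hylen
      have e2 : (grid[y]).getD x "" = grid[y][x] := List.getD_eq_getElem _ _ hxlen
      simp only [e1, e2, zero_add]

-- ===== VERDICT (by name: the statement is the Claim_ definition above) =====
theorem step_spec : Claim_equal_step := by
  intro grid _ hpre
  unfold Spec_step
  rw [step_eq_target grid hpre, alt_eq_target grid hpre]
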